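-- pv_equiv track=rewrite | github.com/Chan1723/Juego-NIM | FNC.py | formaClausal
-- ===== SOURCE A (Python) =====
-- def Clausula(C):
--     l = []
--     while  len(C) > 0:
--         s = C[0]
--         if s == '-':
--             l.append(s+C[1])
--             C = C[3:]
--         else:
--             l.append(s)
--             C = C[2:]
--     return l
--     pass
--
-- def formaClausal(A):
--
--     #  IMPLEMENTAR AQUI ALGORITMO FORMA CLAUSAL
--     l = []
--     i = 0
--
--     while(len(A) > 0):
--
--         if i >= len(A):
--                 l.append(Clausula(A))
--                 A = []
--         else:
--             if A[i] == 'Y':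
--                 l.append(Clausula(A[:i]))
--                 A = A[i+1 : ]
--                 i = 0
--             else:
--                 i += 1
--
--     return l
--     pass
-- ===== SOURCE B (Python) =====
-- def Clausula(C):
--     l = []
--     while  len(C) > 0:
--         s = C[0]
--         if s == '-':
--             l.append(s+C[1])
--             C = C[3:]
--         else:
--             l.append(s)
--             C = C[2:]
--     return l
--
-- def formaClausal(A):
--     if not A:
--         return []
--     i = A.find('Y')
--     if i == -1:
--         return [Clausula(A)]
--     return [Clausula(A[:i])] + formaClausal(A[i+1:])
-- ===== Notes on version B (the rewrite author's own statement) =====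
-- stated objective: simpler
-- what changed: Replaces A's while-loop with a manual scan index i and in-place string shrinking by a direct recursion that splits at the first 'Y' found and recurses on the remainder.
import Mathlib
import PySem

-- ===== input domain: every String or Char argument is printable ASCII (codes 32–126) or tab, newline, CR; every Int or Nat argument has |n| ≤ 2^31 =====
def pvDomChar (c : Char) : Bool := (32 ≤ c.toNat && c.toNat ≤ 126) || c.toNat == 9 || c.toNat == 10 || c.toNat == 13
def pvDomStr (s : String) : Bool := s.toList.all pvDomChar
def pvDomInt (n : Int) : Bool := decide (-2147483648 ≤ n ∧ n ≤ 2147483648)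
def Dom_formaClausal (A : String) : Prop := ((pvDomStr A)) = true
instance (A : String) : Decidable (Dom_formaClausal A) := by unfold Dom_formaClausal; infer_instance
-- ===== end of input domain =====

-- B replaces A's index-tracking while loop (scan index i, string shrunk in place) by a
-- direct recursion that splits at the first 'Y' and recurses on the remainder; same cost,
-- simpler decomposition. Clausula is kept unchanged and shared by both ports.

-- ===== PORT A =====
-- Clausula, shared verbatim by both Pythons.  On a clause ending in a lone '-' the Python
-- raises IndexError (C[1]); there this port returns the tokens so far (excluded by Pre_).
def clausulaL : List Char → List String
  | [] => []
  | c :: rest =>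
    if c = '-' then
      match rest with
      | [] => []                                   -- Python: IndexError, outside Pre_
      | d :: rest2 => String.ofList [c, d] :: clausulaL (rest2.drop 1)   -- C = C[3:]
    else String.ofList [c] :: clausulaL (rest.drop 1)                    -- C = C[2:]
  termination_by C => C.length
  decreasing_by all_goals (simp only [List.length_drop, List.length_cons]; omega)

-- A's while loop over state (l, A, i); the i ≥ len branch appends Clausula(A) and sets
-- A = [] so the loop exits: returned directly.
def loopA (l : List (List String)) (A : List Char) (i : Nat) : List (List String) :=
  if A = [] then l
  else if i ≥ A.length then l ++ [clausulaL A]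
  else if A.getD i ' ' = 'Y' then loopA (l ++ [clausulaL (A.take i)]) (A.drop (i+1)) 0
  else loopA l A (i+1)
  termination_by (A.length, A.length - i)
  decreasing_by
    · apply Prod.Lex.left; simp only [List.length_drop]; omega
    · apply Prod.Lex.right; omega

def formaClausal (A : String) : List (List String) := loopA [] A.toList 0

-- ===== PORT B =====
def altL (A : List Char) : List (List String) :=
  if hA : A = [] then []
  else
    match A.findIdx? (· = 'Y') with
    | none => [clausulaL A]
    | some i => clausulaL (A.take i) :: altL (A.drop (i+1))
  termination_by A.length
  decreasing_by
    simp only [List.length_drop]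
    cases A with
    | nil => exact absurd rfl hA
    | cons a as => simp only [List.length_cons]; omega

def formaClausal_alt (A : String) : List (List String) := altL A.toList

-- ===== PRECONDITION & SPEC =====
-- Clausula's consumption grammar succeeds: blocks of three starting '-' (needing at least
-- two characters) or blocks of two otherwise.
-- Token grammar of the input (structural, so that Pre_ is kernel-decidable): 'Y' separates
-- clauses; inside a clause, a '-' starts a three-character block '-xy' and must be followed
-- by at least one non-'Y' character (else Clausula's C[1] is an IndexError in Python), any
-- other character starts a two-character block; trailing truncated blocks are fine.
def preOk : List Char → Bool
  | [] => true
  | c :: rest =>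
    if c = 'Y' then preOk rest
    else if c = '-' then
      match rest with
      | [] => false
      | d :: r2 =>
        if d = 'Y' then false
        else match r2 with
          | [] => true
          | _ :: r3 => preOk r3
    else
      match rest with
      | [] => true
      | _ :: r2 => preOk r2

-- Pre_ excludes exactly the inputs on which Python A raises IndexError: some 'Y'-separated
-- clause whose Clausula scan lands on a final lone '-'.
def Pre_formaClausal (A : String) : Prop :=
  preOk A.toList = true
instance (A : String) : Decidable (Pre_formaClausal A) := by unfold Pre_formaClausal; infer_instance

def pvWitness_formaClausal : String := "-pYq"

def Spec_formaClausal (A : String) (out : List (List String)) : Prop := out = formaClausal_alt A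
instance (A : String) (out : List (List String)) : Decidable (Spec_formaClausal A out) := by unfold Spec_formaClausal; infer_instance

-- ===== CLAIM (what is proved, stated in full; the proofs are below) =====
def Claim_equal_formaClausal : Prop := ∀ (A : String), Dom_formaClausal A → Pre_formaClausal A → Spec_formaClausal A (formaClausal A)

-- ===== LEMMAS AND PROOFS =====

theorem getD_eq_get (A : List Char) (j : Nat) (hj : j < A.length) :
    A.getD j ' ' = A[j] := by
  simp [List.getD_eq_getElem?_getD, List.getElem?_eq_getElem hj]

theorem loopA_eq_altL (A : List Char) (i : Nat) (l : List (List String)) :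
    i ≤ A.length → (∀ j, j < i → ¬ A.getD j ' ' = 'Y') → loopA l A i = l ++ altL A := by
  induction l, A, i using loopA.induct with
  | case1 l i =>
      intro _ _
      rw [loopA, altL]; simp
  | case2 l A i hA hge =>
      intro hle hno
      have hfind : A.findIdx? (· = 'Y') = none := by
        rw [List.findIdx?_eq_none_iff]
        intro x hx
        obtain ⟨j, hj, rfl⟩ := List.getElem_of_mem hx
        have := hno j (by omega)
        rw [getD_eq_get A j hj] at this
        simpa using this
      rw [loopA, altL]
      simp [hA, hge, hfind]
  | case3 l A i hA hge hY ih =>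
      intro hle hno
      have hi : i < A.length := by omega
      have hfind : A.findIdx? (· = 'Y') = some i := by
        rw [List.findIdx?_eq_some_iff_getElem]
        refine ⟨hi, ?_, ?_⟩
        · rw [getD_eq_get A i hi] at hY; simpa using hY
        · intro j hj
          have := hno j hj
          rw [getD_eq_get A j (by omega)] at this
          simpa using this
      rw [loopA, altL]
      simp only [if_neg hA, dif_neg hA, if_neg hge, if_pos hY, hfind]
      rw [ih (by simp) (by intro j hj; omega)]
      simp
  | case4 l A i hA hge hY ih =>
      intro hle hno
      rw [loopA]
      simp only [if_neg hA, if_neg hge, if_neg hY]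
      apply ih (by omega)
      intro j hj
      rcases Nat.lt_or_ge j i with h | h
      · exact hno j h
      · have : j = i := by omega
        subst this; exact hY

-- ===== VERDICT (by name: the statement is the Claim_ definition above) =====
theorem formaClausal_spec : Claim_equal_formaClausal := by
  intro A _ _
  unfold Spec_formaClausal formaClausal formaClausal_alt
  exact loopA_eq_altL A.toList 0 [] (Nat.zero_le _) (by intro j hj; omega)
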